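-- pv_equiv track=rewrite | github.com/3rdVoyager/Caesar-Cipher-Encryptor-and-Decryptor | caesar_cipher.py | check_plausibility
-- ===== SOURCE A (Python) =====
-- def check_plausibility(decrypted_message):
--     # This function checks for common words or patterns in the decrypted message
--     common_words = ["the", "and", "is", "in", "it", "you", "that"]
--     for word in common_words:
--         if word in decrypted_message.lower():
--             return True
--     letters = [char for char in decrypted_message if char.isalpha()]
--     # Check for a reasonable number of vowels in a row (not more than 3)
--     vowel_run = 0
--     for v in letters:
--         if v in 'aeiou':
--             vowel_run += 1
--             if vowel_run > 3:
--                 return False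
--         else:
--             vowel_run = 0
--     # Check for a reasonable number of consonants in a row (not more than 5)
--     consonant_run = 0
--     for c in letters:
--         if c not in 'aeiou':
--             consonant_run += 1
--             if consonant_run > 5:
--                 return False
--         else:
--             consonant_run = 0
--     return True
-- ===== SOURCE B (Python) =====
-- def check_plausibility(decrypted_message):
--     low = decrypted_message.lower()
--     if any(w in low for w in ("the", "and", "is", "in", "it", "you", "that")):
--         return True
--     vowel_run = 0
--     consonant_run = 0
--     for ch in decrypted_message:
--         if not ch.isalpha():
--             continue
--         if ch in 'aeiou':
--             vowel_run += 1
--             consonant_run = 0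
--             if vowel_run > 3:
--                 return False
--         else:
--             consonant_run += 1
--             vowel_run = 0
--             if consonant_run > 5:
--                 return False
--     return True
-- ===== Notes on version B (the rewrite author's own statement) =====
-- stated objective: faster
-- what changed: Replaces A's intermediate letters list and its two separate sequential run-scans (vowel runs, then consonant runs) with a single pass over the original string that skips non-letters, maintains both run counters at once, and returns False as soon as either limit is exceeded.
import Mathlib
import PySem

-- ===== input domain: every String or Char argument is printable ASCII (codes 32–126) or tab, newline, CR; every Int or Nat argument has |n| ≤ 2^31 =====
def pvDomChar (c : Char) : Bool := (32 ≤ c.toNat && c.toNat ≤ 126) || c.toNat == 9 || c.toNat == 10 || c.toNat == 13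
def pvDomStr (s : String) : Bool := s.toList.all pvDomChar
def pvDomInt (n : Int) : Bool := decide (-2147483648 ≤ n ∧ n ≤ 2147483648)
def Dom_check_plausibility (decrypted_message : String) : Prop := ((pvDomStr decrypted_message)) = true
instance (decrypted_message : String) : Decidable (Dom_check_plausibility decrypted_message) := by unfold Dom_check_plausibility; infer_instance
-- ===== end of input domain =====

-- B's one honest line: B fuses A's two sequential run-scans over the letters list into a single
-- pass over the original string maintaining both run counters at once with early exit (objective: faster; measured).

-- ===== PORT A =====
-- `for v in letters: if v in 'aeiou': vowel_run += 1; if vowel_run > 3: return False else: vowel_run = 0`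
def pvVowelLoopA : List Char → Nat → Bool
  | [], _ => true
  | v :: rest, vowel_run =>
    if "aeiou".toList.contains v then
      if vowel_run + 1 > 3 then false else pvVowelLoopA rest (vowel_run + 1)
    else pvVowelLoopA rest 0

-- `for c in letters: if c not in 'aeiou': consonant_run += 1; if consonant_run > 5: return False else: consonant_run = 0`
def pvConsLoopA : List Char → Nat → Bool
  | [], _ => true
  | c :: rest, consonant_run =>
    if !("aeiou".toList.contains c) then
      if consonant_run + 1 > 5 then false else pvConsLoopA rest (consonant_run + 1)
    else pvConsLoopA rest 0

def check_plausibility (decrypted_message : String) : Bool :=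
  let common_words := ["the", "and", "is", "in", "it", "you", "that"]
  if common_words.any (fun w => PySem.Str.isIn w (PySem.Str.lower decrypted_message)) then
    true
  else
    let letters := decrypted_message.toList.filter (fun c => PySem.Chars.strIsalpha [c])
    if pvVowelLoopA letters 0 = false then false
    else pvConsLoopA letters 0

-- ===== PORT B =====
-- B's single pass: skip non-letters, keep both run counters, bail out when either limit is exceeded
def pvRunLoopB : List Char → Nat → Nat → Bool
  | [], _, _ => true
  | ch :: rest, vowel_run, consonant_run =>
    if !(PySem.Chars.strIsalpha [ch]) then pvRunLoopB rest vowel_run consonant_run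
    else if "aeiou".toList.contains ch then
      if vowel_run + 1 > 3 then false else pvRunLoopB rest (vowel_run + 1) 0
    else
      if consonant_run + 1 > 5 then false else pvRunLoopB rest 0 (consonant_run + 1)

def check_plausibility_alt (decrypted_message : String) : Bool :=
  let low := PySem.Str.lower decrypted_message
  if (["the", "and", "is", "in", "it", "you", "that"]).any (fun w => PySem.Str.isIn w low) then
    true
  else pvRunLoopB decrypted_message.toList 0 0

-- ===== PRECONDITION & SPEC =====
def Spec_check_plausibility (decrypted_message : String) (out : Bool) : Prop := out = check_plausibility_alt decrypted_message
instance (decrypted_message : String) (out : Bool) : Decidable (Spec_check_plausibility decrypted_message out) := by unfold Spec_check_plausibility; infer_instance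

-- ===== CLAIM (what is proved, stated in full; the proofs are below) =====
def Claim_equal_check_plausibility : Prop := ∀ (decrypted_message : String), Dom_check_plausibility decrypted_message → Spec_check_plausibility decrypted_message (check_plausibility decrypted_message)

-- ===== LEMMAS AND PROOFS =====

-- B's loop on any list equals B's loop restricted to the alpha characters (the skip branch removed).
theorem pvRunLoopB_filter (xs : List Char) (vr cr : Nat) :
    pvRunLoopB xs vr cr =
      pvRunLoopB (xs.filter (fun c => PySem.Chars.strIsalpha [c])) vr cr := by
  induction xs generalizing vr cr with
  | nil => rfl
  | cons c rest ih =>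
    cases h : PySem.Chars.strIsalpha [c] with
    | true =>
      rw [List.filter_cons_of_pos (p := fun c => PySem.Chars.strIsalpha [c]) h]
      simp only [pvRunLoopB, h, Bool.not_true, Bool.false_eq_true, if_false]
      split_ifs <;> first | rfl | exact ih _ _
    | false =>
      rw [List.filter_cons_of_neg (p := fun c => PySem.Chars.strIsalpha [c]) (by simp [h])]
      simp only [pvRunLoopB, h, Bool.not_false, if_true]
      exact ih _ _

-- On an all-alpha list B's fused loop is the conjunction of A's two loops.
theorem pvRunLoopB_eq_and (ls : List Char) (vr cr : Nat)
    (hls : ∀ c ∈ ls, PySem.Chars.strIsalpha [c] = true) :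
    pvRunLoopB ls vr cr = (pvVowelLoopA ls vr && pvConsLoopA ls cr) := by
  induction ls generalizing vr cr with
  | nil => rfl
  | cons c rest ih =>
    have hc : PySem.Chars.strIsalpha [c] = true := hls c (by simp)
    have hrest : ∀ x ∈ rest, PySem.Chars.strIsalpha [x] = true :=
      fun x hx => hls x (by simp [hx])
    cases hv : "aeiou".toList.contains c with
    | true =>
      simp only [pvRunLoopB, pvVowelLoopA, pvConsLoopA, hc, hv, Bool.not_true,
        Bool.false_eq_true, if_false, if_true]
      split_ifs with h3
      · rfl
      · rw [ih _ _ hrest]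
    | false =>
      simp only [pvRunLoopB, pvVowelLoopA, pvConsLoopA, hc, hv, Bool.not_true, Bool.not_false,
        Bool.false_eq_true, if_false, if_true]
      split_ifs with h5
      · simp
      · rw [ih _ _ hrest]

-- ===== VERDICT (by name: the statement is the Claim_ definition above) =====
theorem check_plausibility_spec : Claim_equal_check_plausibility := by
  intro m _
  unfold Spec_check_plausibility check_plausibility check_plausibility_alt
  by_cases hw : (["the", "and", "is", "in", "it", "you", "that"]).any
      (fun w => PySem.Str.isIn w (PySem.Str.lower m)) = true
  · simp only [hw, if_true]
  · simp only [hw, if_false, Bool.false_eq_true]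
    rw [pvRunLoopB_filter,
        pvRunLoopB_eq_and _ 0 0 (fun c hc => (List.mem_filter.mp hc).2)]
    cases pvVowelLoopA (m.toList.filter (fun c => PySem.Chars.strIsalpha [c])) 0 <;> simp
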